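-- pv_equiv track=rewrite | github.com/YEJIN012/TIL-Algorithm | 프로그래머스/unrated/138476. 귤 고르기/귤 고르기.py | solution
-- ===== SOURCE A (Python) =====
-- def solution(k, tangerine):
--     max_size = max(tangerine)   # max_size : 보유 중인 귤 중 최대 사이즈
--     t_size = [0] * (max_size+1) # 사이즈를 index로 가지는 0 리스트
--     for i in tangerine :        # 사이즈별 귤의 수 카운트
--         t_size[i] += 1
--     size_sum = list((idx, t) for idx, t in enumerate(t_size))   # size_sum : (사이즈, 갯수) 형태 튜플을 원소로 가지는 리스트
--     sort_size_sum = sorted(size_sum, key=lambda x: x[1], reverse=True)  # 갯수가 많은 순서대로 size_sum 정렬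
--
--     answer = 0  # sort_size_sum의 인덱스 (sort_size_sum : 사이즈가 같은 귤끼리 모아놓은 리스트)
--     total = 0   # 상자에 담은 귤의 수
--     while True :
--         if k - total > sort_size_sum[answer][1] :   # 모아놓은 귤 전체를 담아도 k를 넘지않으면,
--             total += sort_size_sum[answer][1]       # 담고 진행.
--         else :                                      # 아니면 해당 사이즈의 귤 일부만 담게 되므로,
--             answer += 1                             # 사이즈 종류만 +1
--             break                                   # 종료.
--
--         answer += 1 # 첫번째 사이즈 -> 0 idx 고려
--
--     return answer
-- ===== SOURCE B (Python) =====
-- def solution(k, tangerine):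
--     counts = [0] * (max(tangerine) + 1)
--     for s in tangerine:
--         counts[s] += 1
--     freq = [0] * (len(tangerine) + 1)  # a count never exceeds len(tangerine)
--     for c in counts:
--         if c > 0:
--             freq[c] += 1
--     remaining = k
--     kinds = 0
--     for c in range(len(tangerine), 0, -1):
--         for _ in range(freq[c]):
--             remaining -= c
--             kinds += 1
--             if remaining <= 0:
--                 return kinds
--     return kinds
-- ===== Notes on version B (the rewrite author's own statement) =====
-- stated objective: alternative
-- what changed: B buckets the per-size counts by frequency and consumes the buckets largest-count-first in a counting-sort style walk, instead of A's enumerate of all max+1 (size,count) pairs, comparison sort and index walk; it drops the O(M log M) sort (a timing run measured ~3x, not claimed here).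
import Mathlib
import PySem

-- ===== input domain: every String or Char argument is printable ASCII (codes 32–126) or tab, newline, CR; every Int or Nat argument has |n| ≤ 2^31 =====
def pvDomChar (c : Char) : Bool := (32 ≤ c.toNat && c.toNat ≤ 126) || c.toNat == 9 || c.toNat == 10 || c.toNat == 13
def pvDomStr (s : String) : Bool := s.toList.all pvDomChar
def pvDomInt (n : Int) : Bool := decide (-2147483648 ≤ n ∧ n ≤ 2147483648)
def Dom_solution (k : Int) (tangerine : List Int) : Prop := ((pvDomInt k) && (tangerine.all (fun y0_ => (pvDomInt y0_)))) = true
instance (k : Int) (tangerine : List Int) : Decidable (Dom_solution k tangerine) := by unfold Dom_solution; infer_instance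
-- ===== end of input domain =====

-- B replaces A's enumerate/sort/index-walk selection by a counting-sort bucket walk
-- over the same counting array: no comparison sort, the counts are bucketed by
-- frequency and consumed largest-first (objective: alternative).


-- ===== PORT A =====
-- the 'while True' loop of A: walks the sorted (size,count) list; 'answer' and 'total'
-- are the Python variables; on list exhaustion Python raises IndexError (outside Pre_).
def loopA (k : Int) : List (Int × Int) → Int → Int → Int
  | [], answer, _ => answer
  | p :: rest, answer, total =>
    if k - total > p.2 then loopA k rest (answer + 1) (total + p.2) else answer + 1

def solution (k : Int) (tangerine : List Int) : Int :=
  match PySem.List.max? tangerine (fun x => x) with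
  | none => 0      -- max([]) raises ValueError; outside Pre_
  | some max_size =>
    -- the Python list t_size, updated in place, is an Array; 't_size[i] += 1'
    -- resolves a negative index from the end exactly as Python does (an
    -- out-of-range index raises IndexError in Python: outside Pre_)
    let t_size := tangerine.foldl
      (fun ts i =>
        let j := (if i < 0 then i + (ts.size : Int) else i).toNat
        ts.setIfInBounds j (ts.getD j 0 + 1))
      (Array.replicate (max_size + 1).toNat (0 : Int))
    -- list(enumerate(t_size)): the zipIdx form of PySem.List.enumerate (equal by
    -- PySem.List.enumerate_eq_zipIdx_map), written this way so evaluation is iterative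
    let size_sum := t_size.toList.zipIdx.map (fun p => ((0 : Int) + (p.2 : Int), p.1))
    -- sorted(size_sum, key=lambda x: x[1], reverse=True): Python's sorted is the
    -- stable sort by descending second component; ported as the corresponding
    -- library stable sort (List.mergeSort) by that order
    let sort_size_sum := size_sum.mergeSort (fun x y => decide (y.2 ≤ x.2))
    loopA k sort_size_sum 0 0

-- ===== PORT B =====
-- the inner 'for _ in range(freq[c])' of B with its early return:
-- result is (remaining, kinds, returned-early?)
def takeB (c : Int) : Nat → Int → Int → Int × Int × Bool
  | 0, remaining, kinds => (remaining, kinds, false)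
  | t + 1, remaining, kinds =>
    if remaining - c ≤ 0 then (remaining - c, kinds + 1, true)
    else takeB c t (remaining - c) (kinds + 1)

-- the outer 'for c in range(len(tangerine), 0, -1)' of B
def loopB (freq : Array Int) : List Int → Int → Int → Int
  | [], _, kinds => kinds
  | c :: rest, remaining, kinds =>
    match takeB c (freq.getD c.toNat 0).toNat remaining kinds with
    | (r', k', done) => if done then k' else loopB freq rest r' k'

def solution_alt (k : Int) (tangerine : List Int) : Int :=
  match PySem.List.max? tangerine (fun x => x) with
  | none => 0      -- max([]) raises ValueError; outside Pre_
  | some max_size =>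
    -- counts = [0] * (max(tangerine) + 1); counts[s] += 1 — the same Python
    -- list-indexing semantics as in A's port (negative index from the end;
    -- out of range raises in Python: outside Pre_)
    let counts := tangerine.foldl
      (fun ts i =>
        let j := (if i < 0 then i + (ts.size : Int) else i).toNat
        ts.setIfInBounds j (ts.getD j 0 + 1))
      (Array.replicate (max_size + 1).toNat (0 : Int))
    -- freq[c] = how many sizes occur exactly c times
    let freq := counts.toList.foldl
      (fun f c =>
        if c > 0 then
          let j := (if c < 0 then c + (f.size : Int) else c).toNat
          f.setIfInBounds j (f.getD j 0 + 1)
        else f)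
      (Array.replicate (tangerine.length + 1) (0 : Int))
    loopB freq (PySem.List.pyRange (tangerine.length : Int) 0 (-1)) k 0

-- ===== PRECONDITION & SPEC =====
-- Pre_ is exactly the inputs on which A returns: a nonempty list with some
-- nonnegative size, every size at least -(max+1) (further left Python's
-- negative-index wraparound itself is out of range: IndexError) and
-- k ≤ len(tangerine) (otherwise A walks past its sorted list: IndexError);
-- 'max(tangerine) ≥ 0' and 'x ≥ -(max+1)' are phrased with ∃ y ∈ tangerine.
def Pre_solution (k : Int) (tangerine : List Int) : Prop :=
  tangerine ≠ [] ∧ k ≤ tangerine.length ∧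
    ∀ x ∈ tangerine, ∃ y ∈ tangerine, 0 ≤ x + y + 1 ∧ 0 ≤ y
instance (k : Int) (tangerine : List Int) : Decidable (Pre_solution k tangerine) := by
  unfold Pre_solution; infer_instance
def pvWitness_solution : Int × List Int := (2, [1, 3, 2, 5, 4, 5, 2, 3])

def Spec_solution (k : Int) (tangerine : List Int) (out : Int) : Prop := out = solution_alt k tangerine
instance (k : Int) (tangerine : List Int) (out : Int) : Decidable (Spec_solution k tangerine out) := by unfold Spec_solution; infer_instance

-- ===== CLAIM (what is proved, stated in full; the proofs are below) =====
def Claim_equal_solution : Prop := ∀ (k : Int) (tangerine : List Int), Dom_solution k tangerine → Pre_solution k tangerine → Spec_solution k tangerine (solution k tangerine)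

-- ===== LEMMAS AND PROOFS =====

-- loopA only looks at the second components
def loopAv (k : Int) : List Int → Int → Int → Int
  | [], answer, _ => answer
  | c :: rest, answer, total =>
    if k - total > c then loopAv k rest (answer + 1) (total + c) else answer + 1

theorem loopA_eq_loopAv (k : Int) (l : List (Int × Int)) (a t : Int) :
    loopA k l a t = loopAv k (l.map (·.2)) a t := by
  induction l generalizing a t with
  | nil => rfl
  | cons p rest ih => simp only [loopA, loopAv, List.map_cons]; split <;> simp [ih]

-- getD after setIfInBounds, on arrays
theorem arr_getD_set (f : Array Int) (i j : Nat) (v : Int) (hi : i < f.size) :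
    (f.setIfInBounds i v).getD j 0 = if i = j then v else f.getD j 0 := by
  by_cases hj : j < f.size
  · have hj' : j < (f.setIfInBounds i v).size := by simpa [Array.size_setIfInBounds] using hj
    rw [Array.getD_eq_getD_getElem?, Array.getD_eq_getD_getElem?,
        Array.getElem?_eq_getElem hj', Array.getElem?_eq_getElem hj]
    rw [Array.getElem_setIfInBounds hj]
    split_ifs <;> simp_all
  · have hij : i ≠ j := by omega
    have hj' : ¬ j < (f.setIfInBounds i v).size := by simpa [Array.size_setIfInBounds] using hj
    rw [Array.getD_eq_getD_getElem?, Array.getD_eq_getD_getElem?,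
        Array.getElem?_eq_none (by omega), Array.getElem?_eq_none (by simpa using hj')]
    simp [hij]

-- the wrap-updating counting fold: size, sum and nonnegativity of the entries
theorem wrapfold_props (l : List Int) (ts : Array Int)
    (h : ∀ x ∈ l, -(ts.size : Int) ≤ x ∧ x < (ts.size : Int))
    (h0 : ∀ v ∈ ts.toList, 0 ≤ v) :
    (l.foldl (fun ts i =>
        let j := (if i < 0 then i + (ts.size : Int) else i).toNat
        ts.setIfInBounds j (ts.getD j 0 + 1)) ts).size = ts.size ∧
    (l.foldl (fun ts i =>
        let j := (if i < 0 then i + (ts.size : Int) else i).toNat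
        ts.setIfInBounds j (ts.getD j 0 + 1)) ts).toList.sum = ts.toList.sum + l.length ∧
    (∀ v ∈ (l.foldl (fun ts i =>
        let j := (if i < 0 then i + (ts.size : Int) else i).toNat
        ts.setIfInBounds j (ts.getD j 0 + 1)) ts).toList, 0 ≤ v) := by
  induction l generalizing ts with
  | nil => exact ⟨rfl, by simp, h0⟩
  | cons x xs ih =>
    have hx := h x (by simp)
    set j := (if x < 0 then x + (ts.size : Int) else x).toNat with hjdef
    have hj : j < ts.size := by
      rw [hjdef]; split_ifs with hneg <;> omega
    have hjlen : j < ts.toList.length := by simpa using hj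
    set ts' := ts.setIfInBounds j (ts.getD j 0 + 1) with hts'
    have hsize' : ts'.size = ts.size := Array.size_setIfInBounds
    have hlist' : ts'.toList = ts.toList.set j (ts.getD j 0 + 1) :=
      Array.toList_setIfInBounds
    have hgd : ts.getD j 0 = ts.toList[j] := by
      rw [Array.getD_eq_getD_getElem?, Array.getElem?_eq_getElem hj]
      simp
    have hsum' : ts'.toList.sum = ts.toList.sum + 1 := by
      rw [hlist', List.sum_set]
      have hdecomp : ts.toList.sum =
          (ts.toList.take j).sum + ts.toList[j] + (ts.toList.drop (j + 1)).sum := by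
        conv_lhs => rw [← List.take_append_drop j ts.toList]
        rw [List.sum_append, List.drop_eq_getElem_cons hjlen, List.sum_cons]
        ring
      rw [if_pos hjlen, hgd]
      omega
    have hnn' : ∀ v ∈ ts'.toList, 0 ≤ v := by
      intro v hv
      rw [hlist'] at hv
      rcases List.mem_or_eq_of_mem_set hv with hv' | rfl
      · exact h0 v hv'
      · have := h0 ts.toList[j] (by simp)
        omega
    have hxs : ∀ y ∈ xs, -(ts'.size : Int) ≤ y ∧ y < (ts'.size : Int) := by
      intro y hy
      rw [hsize']
      exact h y (by simp [hy])
    obtain ⟨s1, s2, s3⟩ := ih ts' hxs hnn'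
    refine ⟨by rw [List.foldl_cons, ← hts', s1, hsize'], ?_, by rw [List.foldl_cons, ← hts']; exact s3⟩
    rw [List.foldl_cons, ← hts', s2, hsum']
    simp
    omega

-- the frequency fold: entry j holds its old value plus the count of j (for j ≥ 1)
theorem freqfold_getD (l : List Int) (f : Array Int)
    (hl : ∀ c ∈ l, 0 ≤ c ∧ c < (f.size : Int)) :
    (l.foldl (fun f c =>
        if c > 0 then
          let j := (if c < 0 then c + (f.size : Int) else c).toNat
          f.setIfInBounds j (f.getD j 0 + 1)
        else f) f).size = f.size ∧
    ∀ j : Nat, 1 ≤ j →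
      (l.foldl (fun f c =>
        if c > 0 then
          let j := (if c < 0 then c + (f.size : Int) else c).toNat
          f.setIfInBounds j (f.getD j 0 + 1)
        else f) f).getD j 0 = f.getD j 0 + (l.count (j : Int) : Int) := by
  induction l generalizing f with
  | nil => exact ⟨rfl, by simp⟩
  | cons c cs ih =>
    have hc := hl c (by simp)
    by_cases hpos : c > 0
    · have hcn : c.toNat < f.size := by omega
      have hidx : (if c < 0 then c + (f.size : Int) else c).toNat = c.toNat := by
        rw [if_neg (by omega)]
      set f' := f.setIfInBounds c.toNat (f.getD c.toNat 0 + 1) with hf'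
      have hunfold : ∀ (g : Array Int → Int → Array Int), g = (fun f c =>
          if c > 0 then
            let j := (if c < 0 then c + (f.size : Int) else c).toNat
            f.setIfInBounds j (f.getD j 0 + 1)
          else f) → List.foldl g f (c :: cs) = List.foldl g f' cs := by
        intro g hg
        rw [List.foldl_cons]
        congr 1
        rw [hg]
        show (if c > 0 then
            let j := (if c < 0 then c + (f.size : Int) else c).toNat
            f.setIfInBounds j (f.getD j 0 + 1)
          else f) = f'
        rw [if_pos hpos]
        show f.setIfInBounds (if c < 0 then c + (f.size : Int) else c).toNat
          (f.getD (if c < 0 then c + (f.size : Int) else c).toNat 0 + 1) = f'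
        rw [hidx]
      have hsize' : f'.size = f.size := Array.size_setIfInBounds
      have hcs : ∀ d ∈ cs, 0 ≤ d ∧ d < (f'.size : Int) := by
        intro d hd
        rw [hsize']
        exact hl d (by simp [hd])
      obtain ⟨s1, s2⟩ := ih f' hcs
      rw [hunfold _ rfl]
      constructor
      · rw [s1]; exact hsize'
      · intro j hj
        rw [s2 j hj, hf', arr_getD_set f c.toNat j _ hcn]
        by_cases hcj : c.toNat = j
        · have hcjI : c = (j : Int) := by omega
          rw [if_pos hcj, List.count_cons, if_pos (by exact beq_iff_eq.2 hcjI), hcj]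
          push_cast
          ring
        · have hcjI : ¬ c = (j : Int) := by omega
          rw [if_neg hcj, List.count_cons, if_neg (by simpa using hcjI)]
          push_cast
          omega
    · have hc0 : c = 0 := by omega
      have hcs : ∀ d ∈ cs, 0 ≤ d ∧ d < (f.size : Int) := fun d hd => hl d (by simp [hd])
      obtain ⟨s1, s2⟩ := ih f hcs
      constructor
      · rw [List.foldl_cons, if_neg hpos]; exact s1
      · intro j hj
        rw [List.foldl_cons, if_neg hpos, s2 j hj, hc0, List.count_cons,
            if_neg (by simp; omega)]
        push_cast
        ring

-- counting the members of the bucket expansion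
theorem count_flatMap_replicate (cs : List Int) (f : Int → Nat) (hnd : cs.Nodup) (v : Int) :
    (cs.flatMap fun c => List.replicate (f c) c).count v = if v ∈ cs then f v else 0 := by
  induction cs with
  | nil => simp
  | cons c cs ih =>
    rw [List.flatMap_cons, List.count_append, ih hnd.of_cons, List.count_replicate]
    by_cases hvc : v = c
    · subst hvc
      have : v ∉ cs := (List.nodup_cons.1 hnd).1
      simp [this]
    · simp only [show (c == v) = false by simpa using fun h => hvc h.symm]
      by_cases hv : v ∈ cs <;> simp [hv, hvc]

-- the bucket expansion of a strictly descending bucket list is sorted descending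
theorem flatMap_replicate_pairwise (cs : List Int) (f : Int → Nat)
    (hp : cs.Pairwise (· > ·)) :
    (cs.flatMap fun c => List.replicate (f c) c).Pairwise (fun a b => b ≤ a) := by
  induction cs with
  | nil => simp
  | cons c cs ih =>
    rw [List.flatMap_cons, List.pairwise_append]
    refine ⟨List.pairwise_replicate.2 (Or.inr le_rfl), ih hp.of_cons, ?_⟩
    intro a ha b hb
    obtain rfl := List.eq_of_mem_replicate ha
    obtain ⟨c', hc', hb'⟩ := List.mem_flatMap.1 hb
    obtain rfl := List.eq_of_mem_replicate hb'
    exact le_of_lt (List.rel_of_pairwise_cons hp hc')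

-- what takeB computes when it does not return early
theorem takeB_spec_false (c : Int) (t : Nat) (r a r' a' : Int)
    (h : takeB c t r a = (r', a', false)) :
    r' = r - t * c ∧ a' = a + t ∧ (t ≠ 0 → 0 < r') := by
  induction t generalizing r a with
  | zero =>
    simp only [takeB, Prod.mk.injEq] at h
    obtain ⟨rfl, rfl, -⟩ := h
    simp
  | succ t ih =>
    simp only [takeB] at h
    split_ifs at h with hle
    · simp at h
    · obtain ⟨h1, h2, h3⟩ := ih _ _ h
      refine ⟨by rw [h1]; push_cast; ring, by rw [h2]; push_cast; ring, fun _ => ?_⟩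
      by_cases ht : t = 0
      · subst ht
        simp only [takeB, Prod.mk.injEq] at h
        omega
      · exact h3 ht

-- one bucket of B against the corresponding replicate-block of A's walk
theorem takeB_loopAv (k c : Int) (t : Nat) (rest : List Int) (a tot : Int) :
    loopAv k (List.replicate t c ++ rest) a tot =
      (match takeB c t (k - tot) a with
       | (r', k', done) => if done then k' else loopAv k rest k' (k - r')) := by
  induction t generalizing a tot with
  | zero =>
    simp only [List.replicate, List.nil_append, takeB]
    have h1 : k - (k - tot) = tot := by ring
    rw [h1]
    simp
  | succ t ih =>
    rw [List.replicate_succ, List.cons_append]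
    show (if k - tot > c then loopAv k (List.replicate t c ++ rest) (a + 1) (tot + c)
          else a + 1) = _
    simp only [takeB]
    by_cases hgt : k - tot > c
    · rw [if_pos hgt, if_neg (show ¬ k - tot - c ≤ 0 by omega), ih (a + 1) (tot + c),
          show k - (tot + c) = k - tot - c by ring]
    · rw [if_neg hgt, if_pos (show k - tot - c ≤ 0 by omega)]
      simp

-- the whole bucket walk of B against A's walk over the expansion (plus trailing zeros)
theorem walk (k : Int) (freq : Array Int) (cs zs : List Int) (a tot : Int)
    (hpos : ∀ c ∈ cs, 0 < c)
    (hcov : k - tot ≤ (cs.flatMap fun c => List.replicate (freq.getD c.toNat 0).toNat c).sum)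
    (hne : (cs.flatMap fun c => List.replicate (freq.getD c.toNat 0).toNat c) ≠ []) :
    loopAv k ((cs.flatMap fun c => List.replicate (freq.getD c.toNat 0).toNat c) ++ zs) a tot
      = loopB freq cs (k - tot) a := by
  induction cs generalizing a tot with
  | nil => exact absurd (by simp) hne
  | cons c cs ih =>
    set fc := (freq.getD c.toNat 0).toNat with hfc
    rw [List.flatMap_cons, List.append_assoc, takeB_loopAv]
    show _ = loopB freq (c :: cs) (k - tot) a
    rw [loopB]
    rcases htb : takeB c fc (k - tot) a with ⟨r', k', done⟩
    cases done with
    | true => simp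
    | false =>
      simp only [if_neg (Bool.false_ne_true)]
      obtain ⟨hr', hk', hpos'⟩ := takeB_spec_false c fc _ _ _ _ htb
      have hsumrep : (List.replicate fc c).sum = (fc : Int) * c := by
        rw [List.sum_replicate, nsmul_eq_mul]
      have hcov2 : k - tot ≤ (fc : Int) * c +
          (cs.flatMap fun c => List.replicate (freq.getD c.toNat 0).toNat c).sum := by
        have := hcov
        rw [List.flatMap_cons, List.sum_append, hsumrep] at this
        exact this
      have hcov' : k - (k - r') ≤
          (cs.flatMap fun c => List.replicate (freq.getD c.toNat 0).toNat c).sum := by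
        omega
      have hne' : (cs.flatMap fun c => List.replicate (freq.getD c.toNat 0).toNat c) ≠ [] := by
        by_cases hfc0 : fc = 0
        · intro hnil
          apply hne
          rw [List.flatMap_cons, hnil, ← hfc, hfc0]
          simp
        · intro hnil
          have h0 : 0 < r' := hpos' hfc0
          rw [hnil] at hcov'
          simp at hcov'
          omega
      rw [ih k' (k - r') (fun d hd => hpos d (by simp [hd])) hcov' hne',
          show k - (k - r') = r' by ring]

-- ===== VERDICT (by name: the statement is the Claim_ definition above) =====
theorem solution_spec : Claim_equal_solution := by
  intro k tangerine _ hpre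
  obtain ⟨hne, hkn, hprop⟩ := hpre
  unfold Spec_solution
  -- max(tangerine)
  obtain ⟨m, hm⟩ : ∃ m, PySem.List.max? tangerine (fun x => x) = some m := by
    cases hmx : PySem.List.max? tangerine (fun x => x) with
    | none => exact absurd ((PySem.List.max?_eq_none_iff _ _).1 hmx) hne
    | some m => exact ⟨m, rfl⟩
  have hmax : ∀ y ∈ tangerine, y ≤ m := PySem.List.max?_isMax hm
  have hm0 : 0 ≤ m := by
    obtain ⟨x, hx⟩ := List.exists_mem_of_ne_nil tangerine hne
    obtain ⟨y, hy, -, hy0⟩ := hprop x hx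
    exact le_trans hy0 (hmax y hy)
  set N := (m + 1).toNat with hN
  have hNint : (N : Int) = m + 1 := by omega
  set n := tangerine.length with hn
  have hn1 : 1 ≤ n := List.length_pos_of_ne_nil hne
  -- the counting array both programs build
  set TS := tangerine.foldl
      (fun ts i =>
        let j := (if i < 0 then i + (ts.size : Int) else i).toNat
        ts.setIfInBounds j (ts.getD j 0 + 1))
      (Array.replicate N (0 : Int)) with hTS
  have hbounds : ∀ x ∈ tangerine,
      -(((Array.replicate N (0 : Int)).size) : Int) ≤ x ∧
        x < (((Array.replicate N (0 : Int)).size) : Int) := by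
    intro x hx
    obtain ⟨y, hy, hxy, hy0⟩ := hprop x hx
    have h1 := hmax y hy
    have h2 := hmax x hx
    rw [Array.size_replicate]
    omega
  obtain ⟨hTSsize, hTSsum, hTSnn⟩ := wrapfold_props tangerine (Array.replicate N 0) hbounds
    (by intro v hv; rw [Array.toList_replicate] at hv; rw [List.eq_of_mem_replicate hv])
  set L := TS.toList with hL
  have hLlen : L.length = N := by
    rw [hL, Array.length_toList, hTSsize, Array.size_replicate]
  have hLsum : L.sum = (n : Int) := by
    rw [hL, hTSsum, Array.toList_replicate, List.sum_replicate]
    simp [hn]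
  have hLnn : ∀ v ∈ L, 0 ≤ v := hTSnn
  have hLle : ∀ v ∈ L, v ≤ (n : Int) := by
    intro v hv
    have := List.single_le_sum hLnn v hv
    omega
  -- the frequency array
  set freq := L.foldl
      (fun f c =>
        if c > 0 then
          let j := (if c < 0 then c + (f.size : Int) else c).toNat
          f.setIfInBounds j (f.getD j 0 + 1)
        else f)
      (Array.replicate (n + 1) (0 : Int)) with hfreq
  have hfentry : ∀ c ∈ L, 0 ≤ c ∧ c < ((Array.replicate (n + 1) (0 : Int)).size : Int) := by
    intro c hc
    refine ⟨hLnn c hc, ?_⟩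
    rw [Array.size_replicate]
    have := hLle c hc
    omega
  obtain ⟨hfsize, hfval⟩ := freqfold_getD L (Array.replicate (n + 1) 0) hfentry
  have hrepgd : ∀ j : Nat, j < n + 1 → (Array.replicate (n + 1) (0 : Int)).getD j 0 = 0 := by
    intro j hj
    rw [Array.getD_eq_getD_getElem?, Array.getElem?_eq_getElem (by simpa using hj)]
    simp
  have hfreqval : ∀ c : Int, 1 ≤ c → c ≤ (n : Int) →
      (freq.getD c.toNat 0).toNat = L.count c := by
    intro c h1 h2
    have hc1 : 1 ≤ c.toNat := by omega
    have := hfval c.toNat hc1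
    rw [hrepgd c.toNat (by omega)] at this
    rw [hfreq] at *
    rw [this, show ((c.toNat : Nat) : Int) = c by omega]
    omega
  -- the descending bucket list range(n, 0, -1)
  set cs := PySem.List.pyRange (n : Int) 0 (-1) with hcs
  have hcseq : cs = (List.range n).map (fun j : Nat => (n : Int) - (j : Int)) := by
    rw [hcs, PySem.List.pyRange_neg_one]
    norm_num
  have hmemcs : ∀ c : Int, c ∈ cs ↔ 1 ≤ c ∧ c ≤ (n : Int) := by
    intro c
    rw [hcseq, List.mem_map]
    constructor
    · rintro ⟨j, hj, rfl⟩
      rw [List.mem_range] at hj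
      omega
    · rintro ⟨h1, h2⟩
      exact ⟨(n : Int).toNat - c.toNat, by rw [List.mem_range]; omega, by omega⟩
  have hcspw : cs.Pairwise (· > ·) := by
    rw [hcseq]
    exact List.Pairwise.map _ (fun a b (h : a < b) => by omega) (List.pairwise_lt_range)
  have hcsnd : cs.Nodup := hcspw.imp (fun h => by omega)
  -- the bucket expansion
  set D := cs.flatMap (fun c => List.replicate (freq.getD c.toNat 0).toNat c) with hD
  -- D together with the zero entries is a permutation of the counting array
  have hperm : (D ++ List.replicate (L.count 0) (0 : Int)).Perm L := by
    rw [List.perm_iff_count]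
    intro v
    rw [List.count_append, hD, count_flatMap_replicate cs _ hcsnd v, List.count_replicate]
    by_cases h1 : v ∈ cs
    · obtain ⟨hv1, hv2⟩ := (hmemcs v).1 h1
      rw [if_pos h1, hfreqval v hv1 hv2, if_neg (by simp; omega)]
      ring
    · rw [if_neg h1]
      by_cases h0 : v = 0
      · subst h0
        simp
      · rw [if_neg (by simpa using fun h => h0 h.symm)]
        have : v ∉ L := by
          intro hv
          have := hLnn v hv
          have := hLle v hv
          exact h1 ((hmemcs v).2 ⟨by omega, by omega⟩)
        rw [List.count_eq_zero.2 this]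
  -- A's enumerated pair list and its mergeSort
  set SS := L.zipIdx.map (fun p => ((0 : Int) + (p.2 : Int), p.1)) with hSS
  set S := SS.mergeSort (fun x y => decide (y.2 ≤ x.2)) with hS
  -- both sides of the key equality are sorted descending
  have hApw : (S.map (fun x => x.2)).Pairwise (fun a b => b ≤ a) := by
    refine List.Pairwise.map (fun x : Int × Int => x.2)
      (fun (a b : Int × Int) (h : decide (b.2 ≤ a.2) = true) => of_decide_eq_true h) ?_
    exact List.pairwise_mergeSort
      (fun a b c h1 h2 => by
        simp only [decide_eq_true_eq] at *
        omega)
      (fun a b => by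
        by_cases h : b.2 ≤ a.2 <;> simp [h]; omega)
      SS
  have hAperm : (S.map (fun x => x.2)).Perm L := by
    have h1 := (List.mergeSort_perm SS (fun x y => decide (y.2 ≤ x.2))).map
      (fun x : Int × Int => x.2)
    have h2 : SS.map (fun x : Int × Int => x.2) = L := by
      rw [hSS, List.map_map]
      have hc : ((fun x : Int × Int => x.2) ∘ fun p : Int × Nat => ((0 : Int) + (p.2 : Int), p.1))
          = Prod.fst := by funext p; rfl
      rw [hc, List.zipIdx_map_fst]
    rw [← hS] at h1
    rwa [h2] at h1
  have hDpw : (D ++ List.replicate (L.count 0) (0 : Int)).Pairwise (fun a b => b ≤ a) := by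
    rw [List.pairwise_append]
    refine ⟨hD ▸ flatMap_replicate_pairwise cs _ hcspw,
      List.pairwise_replicate.2 (Or.inr le_rfl), ?_⟩
    intro a ha b hb
    obtain rfl := List.eq_of_mem_replicate hb
    rw [hD] at ha
    obtain ⟨c, hc, ha'⟩ := List.mem_flatMap.1 ha
    obtain rfl := List.eq_of_mem_replicate ha'
    have := (hmemcs _).1 hc
    omega
  have hkey : S.map (fun x => x.2) = D ++ List.replicate (L.count 0) (0 : Int) :=
    List.Perm.eq_of_pairwise (fun a b _ _ h1 h2 => le_antisymm h2 h1)
      hApw hDpw (hAperm.trans hperm.symm)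
  -- the expansion covers k and is nonempty
  have hDsum : D.sum = (n : Int) := by
    have := hperm.sum_eq
    rw [List.sum_append, List.sum_replicate, smul_zero, add_zero, hLsum] at this
    exact this
  have hDne : D ≠ [] := by
    intro h
    rw [h] at hDsum
    simp at hDsum
    omega
  -- A computes loopA over the sorted enumeration
  have hA : solution k tangerine = loopA k S 0 0 := by
    unfold solution
    rw [hm]
  -- B computes loopB over the buckets
  have hB : solution_alt k tangerine = loopB freq cs k 0 := by
    unfold solution_alt
    rw [hm]
  -- assemble
  rw [hA, hB, loopA_eq_loopAv, hkey,
      walk k freq cs _ 0 0 (fun c hc => by have := (hmemcs c).1 hc; omega)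
        (by rw [← hD, sub_zero, hDsum]; omega) (hD ▸ hDne),
      sub_zero]
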